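-- pv_equiv track=rewrite | github.com/wannavi/ps | programmers/42578.py | solution
-- ===== SOURCE A (Python) =====
-- from collections import defaultdict
--
-- def solution(clothes):
--     dic = defaultdict(int)
--     for _, k in clothes:
--         dic[k] += 1
--
--     ret = 1
--     for v in dic.values():
--         ret *= v + 1
--
--     return ret - 1
-- ===== SOURCE B (Python) =====
-- def solution(clothes):
--     def go(cs):
--         if not cs:
--             return 1
--         c = cs[0]
--         return (cs.count(c) + 1) * go([x for x in cs if x != c])
--     return go([k for _, k in clothes]) - 1
-- ===== Notes on version B (the rewrite author's own statement) =====
-- stated objective: alternative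
-- what changed: B replaces the hash-table counting pass and the product over dict values by a recursive partition: take the first remaining category, multiply by (its count in the list + 1), and recurse on the clothes of other categories; no dict is built.
import Mathlib
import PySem

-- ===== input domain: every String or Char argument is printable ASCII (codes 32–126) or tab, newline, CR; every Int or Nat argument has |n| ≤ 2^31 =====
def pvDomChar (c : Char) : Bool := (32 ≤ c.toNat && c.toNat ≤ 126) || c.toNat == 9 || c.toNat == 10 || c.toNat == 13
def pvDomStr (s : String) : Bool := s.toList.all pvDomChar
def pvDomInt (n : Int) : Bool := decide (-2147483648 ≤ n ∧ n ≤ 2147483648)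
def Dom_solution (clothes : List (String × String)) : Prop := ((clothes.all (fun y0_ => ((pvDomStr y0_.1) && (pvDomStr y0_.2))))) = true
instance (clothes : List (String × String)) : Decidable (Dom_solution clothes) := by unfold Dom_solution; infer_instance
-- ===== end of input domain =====

-- B replaces A's hash-table counting pass by a recursive partition on the first remaining
-- category (objective: alternative decomposition, same results; no speed claim).

-- ===== PORT A =====
-- dic = defaultdict(int); for _, k in clothes: dic[k] += 1
-- ret = 1; for v in dic.values(): ret *= v + 1; return ret - 1
def solution (clothes : List (String × String)) : Int :=
  let dic : PySem.Dict String Int :=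
    clothes.foldl (fun d p => d.modify p.2 0 (· + 1)) PySem.Dict.empty
  let ret : Int := dic.values.foldl (fun r v => r * (v + 1)) 1
  ret - 1

-- ===== PORT B =====
-- go(cs): 1 if cs empty, else (cs.count(cs[0]) + 1) * go([x for x in cs if x != cs[0]])
def solution_alt_go : List String → Int
  | [] => 1
  | c :: t =>
    (((c :: t).count c : Int) + 1) * solution_alt_go ((c :: t).filter (fun x => x != c))
termination_by cs => cs.length
decreasing_by
  simp only [List.filter_cons, bne_self_eq_false, List.length_cons]
  exact Nat.lt_succ_of_le (List.length_filter_le _ _)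

def solution_alt (clothes : List (String × String)) : Int :=
  solution_alt_go (clothes.map (fun p => p.2)) - 1

-- ===== PRECONDITION & SPEC =====
def Spec_solution (clothes : List (String × String)) (out : Int) : Prop := out = solution_alt clothes
instance (clothes : List (String × String)) (out : Int) : Decidable (Spec_solution clothes out) := by unfold Spec_solution; infer_instance

-- ===== CLAIM (what is proved, stated in full; the proofs are below) =====
def Claim_equal_solution : Prop := ∀ (clothes : List (String × String)), Dom_solution clothes → Spec_solution clothes (solution clothes)

-- ===== LEMMAS AND PROOFS =====

-- A's product loop as a List.prod
theorem foldl_mul_succ (l : List Int) (a : Int) :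
    l.foldl (fun r v => r * (v + 1)) a = a * (l.map (· + 1)).prod := by
  induction l generalizing a with
  | nil => simp
  | cons x t ih => simp [List.foldl_cons, ih]; ring

-- folding Set.add ignores elements already seen (specialised to one seen element c)
theorem foldl_add_filter_mem (t : List String) :
    ∀ (acc : PySem.Set String) (c : String), c ∈ acc →
      t.foldl PySem.Set.add acc = (t.filter (fun x => x != c)).foldl PySem.Set.add acc := by
  induction t with
  | nil => intro acc c _; rfl
  | cons x t ih =>
    intro acc c hc
    by_cases hx : x = c
    · subst hx
      have : PySem.Set.add acc x = acc := by
        simp [PySem.Set.add, PySem.Set.contains, hc]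
      simp [List.foldl_cons, this, ih acc x hc]
    · simp only [List.filter_cons, bne_iff_ne, ne_eq, hx, not_false_eq_true,
        if_pos, List.foldl_cons]
      exact ih _ c (by simp [PySem.Set.mem_add, hc])

-- a fresh head stays in front of the fold
theorem foldl_add_cons_acc (l : List String) :
    ∀ (acc : PySem.Set String) (c : String), c ∉ l →
      l.foldl PySem.Set.add (c :: acc) = c :: l.foldl PySem.Set.add acc := by
  induction l with
  | nil => intro _ _ _; rfl
  | cons x t ih =>
    intro acc c hc
    have hxc : x ≠ c := fun h => hc (by simp [h])
    have hmem : x ∈ (c :: acc) ↔ x ∈ acc := by simp [hxc]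
    have : PySem.Set.add (c :: acc) x = c :: PySem.Set.add acc x := by
      by_cases h : x ∈ acc
      · simp [PySem.Set.add, PySem.Set.contains, h, hxc]
      · simp [PySem.Set.add, PySem.Set.contains, h, hxc]
    simp only [List.foldl_cons, this]
    exact ih _ c (fun h => hc (by simp [h]))

-- dedup of a list peels the first element and its later duplicates
theorem dedup_cons_filter (c : String) (t : List String) :
    PySem.List.dedup (c :: t) =
      c :: PySem.List.dedup (t.filter (fun x => x != c)) := by
  have h1 : PySem.List.dedup (c :: t) = t.foldl PySem.Set.add [c] := by
    simp [PySem.List.dedup_eq_ofList, PySem.Set.ofList_eq_foldl, List.foldl_cons,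
      PySem.Set.add, PySem.Set.contains]
  have h2 : PySem.List.dedup (t.filter (fun x => x != c)) =
      (t.filter (fun x => x != c)).foldl PySem.Set.add [] := by
    simp [PySem.List.dedup_eq_ofList, PySem.Set.ofList_eq_foldl]
  have hnot : c ∉ t.filter (fun x => x != c) := by
    intro h
    have := List.of_mem_filter h
    simp at this
  rw [h1, foldl_add_filter_mem t [c] c (by simp)]
  have : ([c] : PySem.Set String) = c :: ([] : List String) := rfl
  rw [this, foldl_add_cons_acc _ _ _ hnot, h2]

-- B's recursion computes the product over the distinct categories
theorem go_eq_prod (cs : List String) :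
    solution_alt_go cs =
      ((PySem.List.dedup cs).map (fun k => ((cs.count k : Int) + 1))).prod := by
  induction hn : cs.length using Nat.strong_induction_on generalizing cs with
  | _ n ih =>
    match cs with
    | [] => simp [solution_alt_go, PySem.List.dedup]
    | c :: t =>
      rw [solution_alt_go, dedup_cons_filter c t]
      have hlen : ((c :: t).filter (fun x => x != c)).length < n := by
        subst hn
        simp only [List.filter_cons, bne_self_eq_false, List.length_cons]
        exact Nat.lt_succ_of_le (List.length_filter_le _ _)
      rw [ih _ hlen _ rfl]
      have hfc : (c :: t).filter (fun x => x != c) = t.filter (fun x => x != c) := by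
        simp
      rw [hfc, List.map_cons, List.prod_cons]
      congr 1
      refine congrArg List.prod (List.map_congr_left (f := fun k => ((List.count k (List.filter (fun x => x != c) t) : Int) + 1)) ?_)
      intro k hk
      have hkf : k ∈ t.filter (fun x => x != c) := by
        exact (PySem.List.mem_dedup _ _).mp hk
      have hkc : k ≠ c := by
        have := List.of_mem_filter hkf
        simpa using this
      have : (t.filter (fun x => x != c)).count k = t.count k :=
        List.count_filter (by simpa using hkc)
      simp only [this]
      simp [Ne.symm hkc]

-- A's dict is the counter of the category list
theorem dic_eq_counter (clothes : List (String × String)) :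
    clothes.foldl (fun d p => d.modify p.2 0 (· + 1)) PySem.Dict.empty =
      PySem.Dict.counter (clothes.map (fun p => p.2)) := by
  rw [PySem.Dict.counter_eq_foldl, List.foldl_map]

-- ===== VERDICT (by name: the statement is the Claim_ definition above) =====
theorem solution_spec : Claim_equal_solution := by
  intro clothes _
  unfold Spec_solution solution solution_alt
  rw [dic_eq_counter]
  set cats := clothes.map (fun p => p.2) with hcats
  have hvals : (PySem.Dict.counter cats).values =
      (PySem.List.dedup cats).map (fun k => ((cats.count k : Int))) := by
    have : (PySem.Dict.counter cats).values =
        (PySem.Dict.counter cats).items.map (·.2) := rfl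
    rw [this, PySem.Dict.items_counter]
    simp [PySem.List.dedup_eq_ofList]
  show ((PySem.Dict.counter cats).values.foldl (fun r v => r * (v + 1)) 1) - 1 =
      solution_alt_go cats - 1
  rw [hvals, foldl_mul_succ, go_eq_prod]
  simp [List.map_map, Function.comp_def]
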